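-- pv_equiv track=rewrite | github.com/teratensor/Prediction | 5_ball_predict/2_ball2_ml/predict.py | predict_ball2
-- ===== SOURCE A (Python) =====
-- from typing import List, Dict, Tuple
-- from collections import Counter
--
-- def predict_ball2(
--     ball1: int,
--     ball6: int,
--     past_data: List[Dict],
--     top_k: int = 5
-- ) -> List[Tuple[int, float]]:
--     """
--     ball2 예측 (ball1, ball6 조건부)
--
--     Args:
--         ball1: 첫 번째 공 번호
--         ball6: 여섯 번째 공 번호
--         past_data: 과거 데이터
--         top_k: 상위 K개 반환
--
--     Returns:
--         [(ball2, score), ...] 점수 높은 순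
--     """
--     recent_10 = past_data[-10:] if len(past_data) >= 10 else past_data
--     recent_20 = past_data[-20:] if len(past_data) >= 20 else past_data
--
--     # ball2 빈도
--     freq_10 = Counter(d['ball2'] for d in recent_10)
--     freq_20 = Counter(d['ball2'] for d in recent_20)
--
--     # 사용된 번호 제외
--     used = {ball1, ball6}
--
--     candidates = []
--     for num in range(1, 46):
--         if num in used:
--             continue
--
--         # 빈도 점수
--         freq_score = freq_10.get(num, 0) * 2 + freq_20.get(num, 0)
--         candidates.append((num, freq_score))
--
--     candidates.sort(key=lambda x: -x[1])
--     return candidates[:top_k]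
-- ===== SOURCE B (Python) =====
-- def predict_ball2(ball1, ball6, past_data, top_k=5):
--     # One weighted pass over the last 20 draws: an entry in the last 10 contributes
--     # 3 (= 2 from freq_10 + 1 from freq_20), an older one contributes 1.
--     last20 = past_data[-20:]
--     cutoff = len(last20) - 10
--     scores = {}
--     for i, d in enumerate(last20):
--         b = d['ball2']
--         scores[b] = scores.get(b, 0) + (3 if i >= cutoff else 1)
--     used = {ball1, ball6}
--     candidates = [(num, scores.get(num, 0)) for num in range(1, 46) if num not in used]
--     candidates.sort(key=lambda x: -x[1])
--     return candidates[:top_k]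
-- ===== Notes on version B (the rewrite author's own statement) =====
-- stated objective: alternative
-- what changed: Replaces A's two overlapping Counters (last-10 and last-20) plus per-candidate recombination 2*freq10+freq20 with a single positionally-weighted accumulation pass over the last 20 draws (weight 3 inside the last 10, else 1) into one dict.
import Mathlib
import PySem

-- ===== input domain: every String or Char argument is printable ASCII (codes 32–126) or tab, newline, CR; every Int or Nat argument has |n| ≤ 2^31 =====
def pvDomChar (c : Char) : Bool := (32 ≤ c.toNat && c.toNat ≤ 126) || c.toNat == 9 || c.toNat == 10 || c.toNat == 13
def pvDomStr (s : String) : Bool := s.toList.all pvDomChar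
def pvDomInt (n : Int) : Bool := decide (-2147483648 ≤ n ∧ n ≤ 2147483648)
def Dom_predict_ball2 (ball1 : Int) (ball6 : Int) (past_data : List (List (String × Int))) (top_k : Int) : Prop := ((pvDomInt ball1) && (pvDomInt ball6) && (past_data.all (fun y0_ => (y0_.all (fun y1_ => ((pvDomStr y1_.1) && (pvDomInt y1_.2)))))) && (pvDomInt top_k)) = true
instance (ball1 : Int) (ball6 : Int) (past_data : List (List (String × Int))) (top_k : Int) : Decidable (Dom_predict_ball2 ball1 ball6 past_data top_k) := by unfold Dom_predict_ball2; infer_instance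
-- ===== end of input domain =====

-- B replaces A's two overlapping Counters and per-candidate recombination by a single
-- positionally-weighted pass (weight 3 inside the last 10 draws, else 1) into one dict;
-- objective: alternative decomposition, same asymptotic cost.


-- ===== PORT A =====
-- d['ball2'] in total form (both Pythons evaluate exactly this lookup; Pre_ guarantees the key is present)
def ball2Of (d : List (String × Int)) : Int := (PySem.Dict.mk d).getD "ball2" 0

def predict_ball2 (ball1 : Int) (ball6 : Int) (past_data : List (List (String × Int))) (top_k : Int) : List (Int × Int) :=
  let recent_10 := if 10 ≤ past_data.length then PySem.List.slice past_data (some (-10)) none else past_data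
  let recent_20 := if 20 ≤ past_data.length then PySem.List.slice past_data (some (-20)) none else past_data
  let freq_10 := PySem.Dict.counter (recent_10.map ball2Of)
  let freq_20 := PySem.Dict.counter (recent_20.map ball2Of)
  let used : PySem.Set Int := PySem.Set.ofList [ball1, ball6]
  let candidates := (PySem.List.pyRange 1 46 1).foldl
    (fun acc num =>
      if PySem.Set.contains used num then acc
      else acc ++ [(num, freq_10.getD num 0 * 2 + freq_20.getD num 0)]) []
  PySem.List.slice (PySem.List.sorted candidates (fun x => -x.2) false) none (some top_k)

-- ===== PORT B =====
def predict_ball2_alt (ball1 : Int) (ball6 : Int) (past_data : List (List (String × Int))) (top_k : Int) : List (Int × Int) :=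
  let last20 := PySem.List.slice past_data (some (-20)) none
  let cutoff : Int := (last20.length : Int) - 10
  let scores := (PySem.List.enumerate last20 0).foldl
    (fun d p => d.modify (ball2Of p.2) 0 (· + (if cutoff ≤ p.1 then 3 else 1)))
    PySem.Dict.empty
  let used : PySem.Set Int := PySem.Set.ofList [ball1, ball6]
  let candidates := ((PySem.List.pyRange 1 46 1).filter
      (fun num => !PySem.Set.contains used num)).map (fun num => (num, scores.getD num 0))
  PySem.List.slice (PySem.List.sorted candidates (fun x => -x.2) false) none (some top_k)

-- ===== PRECONDITION & SPEC =====
-- Pre_ excludes exactly the inputs where the Pythons raise KeyError: some entry among the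
-- last 20 (the only ones either program reads) lacks the key 'ball2'.
def Pre_predict_ball2 (ball1 : Int) (ball6 : Int) (past_data : List (List (String × Int))) (top_k : Int) : Prop :=
  (PySem.List.slice past_data (some (-20)) none).all (fun d => (PySem.Dict.mk d).contains "ball2") = true
instance (ball1 : Int) (ball6 : Int) (past_data : List (List (String × Int))) (top_k : Int) : Decidable (Pre_predict_ball2 ball1 ball6 past_data top_k) := by unfold Pre_predict_ball2; infer_instance

def pvWitness_predict_ball2 : Int × Int × (List (List (String × Int))) × Int :=
  (3, 7, [[("ball2", 5)], [("ball2", 12)]], 5)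

def Spec_predict_ball2 (ball1 : Int) (ball6 : Int) (past_data : List (List (String × Int))) (top_k : Int) (out : List (Int × Int)) : Prop := out = predict_ball2_alt ball1 ball6 past_data top_k
instance (ball1 : Int) (ball6 : Int) (past_data : List (List (String × Int))) (top_k : Int) (out : List (Int × Int)) : Decidable (Spec_predict_ball2 ball1 ball6 past_data top_k out) := by unfold Spec_predict_ball2; infer_instance

-- ===== CLAIM (what is proved, stated in full; the proofs are below) =====
def Claim_equal_predict_ball2 : Prop := ∀ (ball1 : Int) (ball6 : Int) (past_data : List (List (String × Int))) (top_k : Int), Dom_predict_ball2 ball1 ball6 past_data top_k → Pre_predict_ball2 ball1 ball6 past_data top_k → Spec_predict_ball2 ball1 ball6 past_data top_k (predict_ball2 ball1 ball6 past_data top_k)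

-- ===== LEMMAS AND PROOFS =====

-- A's "last n if long enough, else everything" is a plain suffix drop (n = 10, 20).
lemma suffix10 (xs : List (List (String × Int))) :
    (if 10 ≤ xs.length then PySem.List.slice xs (some (-10)) none else xs)
      = xs.drop (xs.length - 10) := by
  split_ifs with h
  · exact PySem.List.slice_from_neg_ofNat xs 10 (by omega)
  · rw [show xs.length - 10 = 0 by omega, List.drop_zero]

lemma suffix20 (xs : List (List (String × Int))) :
    (if 20 ≤ xs.length then PySem.List.slice xs (some (-20)) none else xs)
      = xs.drop (xs.length - 20) := by
  split_ifs with h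
  · exact PySem.List.slice_from_neg_ofNat xs 20 (by omega)
  · rw [show xs.length - 20 = 0 by omega, List.drop_zero]

-- the ball2 values of an enumerated list are those of the list itself
lemma map_snd_enumerate (xs : List (List (String × Int))) (s : Int) :
    (PySem.List.enumerate xs s).map (fun p => ball2Of p.2) = xs.map ball2Of := by
  rw [PySem.List.enumerate_eq_zipIdx_map, List.map_map]
  rw [show ((fun p : Int × List (String × Int) => ball2Of p.2) ∘
        (fun q : List (String × Int) × Nat => ((s + q.2 : Int), q.1)))
      = (ball2Of ∘ Prod.fst) from rfl]
  rw [← List.map_map, List.zipIdx_map_fst]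

lemma fst_enumerate_bounds {xs : List (List (String × Int))} {s : Int}
    {p : Int × List (String × Int)} (hp : p ∈ PySem.List.enumerate xs s) :
    s ≤ p.1 ∧ p.1 < s + xs.length := by
  rw [PySem.List.enumerate_eq_zipIdx_map] at hp
  obtain ⟨q, hq, rfl⟩ := List.mem_map.mp hp
  have := List.snd_lt_of_mem_zipIdx hq
  refine ⟨by simp, ?_⟩
  simp
  omega

-- a constant-weight accumulation pass counts occurrences
lemma fold_const (l : List (Int × List (String × Int))) (w : Int)
    (d : PySem.Dict Int Int) (num : Int) :
    (l.foldl (fun d p => d.modify (ball2Of p.2) 0 (· + w)) d).getD num 0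
      = d.getD num 0 + w * ((l.map (fun p => ball2Of p.2)).count num) := by
  induction l generalizing d with
  | nil => simp
  | cons p t ih =>
    simp only [List.foldl_cons, List.map_cons]
    rw [ih, PySem.Dict.getD_modify]
    by_cases h : num = ball2Of p.2
    · simp only [List.count_cons, h]
      simp
      ring
    · rw [if_neg h, List.count_cons, if_neg (by simpa using Ne.symm h)]
      push_cast
      ring

-- CORE: B's single weighted pass over L computes A's 2·freq10 + freq20 score
lemma score_eq (L : List (List (String × Int))) (num : Int) :
    ((PySem.List.enumerate L 0).foldl
        (fun d p => d.modify (ball2Of p.2) 0 (· + (if (L.length : Int) - 10 ≤ p.1 then 3 else 1)))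
        PySem.Dict.empty).getD num 0
      = (PySem.Dict.counter ((L.drop (L.length - 10)).map ball2Of)).getD num 0 * 2
        + (PySem.Dict.counter (L.map ball2Of)).getD num 0 := by
  obtain ⟨P, T, hPT, hP, hT⟩ :
      ∃ P T, L = P ++ T ∧ P.length = L.length - 10 ∧ T = L.drop (L.length - 10) :=
    ⟨L.take (L.length - 10), L.drop (L.length - 10),
      (List.take_append_drop _ L).symm,
      by rw [List.length_take]; omega, rfl⟩
  have hTlen : T.length ≤ 10 := by
    rw [hT, List.length_drop]; omega
  have hc : (L.length : Int) - 10 = (P.length : Int) + T.length - 10 := by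
    rw [hPT, List.length_append]; push_cast; ring
  rw [PySem.Dict.getD_counter, PySem.Dict.getD_counter, ← hT]
  conv_lhs => rw [hPT]
  rw [PySem.List.enumerate_append, List.foldl_append]
  have hLlen : L.length = P.length + T.length := by rw [hPT, List.length_append]
  -- the first segment: every index is < cutoff, weight 1
  rw [PySem.List.foldl_congr_mem (PySem.List.enumerate P 0) _
    (fun d p => d.modify (ball2Of p.2) 0 (· + 1)) _
    (by
      intro acc x hx
      obtain ⟨h0, hlt⟩ := fst_enumerate_bounds hx
      rw [if_neg (by simp only [List.length_append]; push_cast; omega)])]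
  -- the second segment: every index is ≥ cutoff, weight 3
  rw [PySem.List.foldl_congr_mem (PySem.List.enumerate T (0 + P.length)) _
    (fun d p => d.modify (ball2Of p.2) 0 (· + 3)) _
    (by
      intro acc x hx
      obtain ⟨h0, hlt⟩ := fst_enumerate_bounds hx
      rw [if_pos (by simp only [List.length_append]; push_cast at h0 ⊢; omega)])]
  rw [fold_const, fold_const, map_snd_enumerate, map_snd_enumerate,
    PySem.Dict.getD_empty, hPT, List.map_append, List.count_append]
  have hdrop : (P ++ T).map ball2Of = P.map ball2Of ++ T.map ball2Of := List.map_append ..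
  push_cast
  ring

-- ===== VERDICT (by name: the statement is the Claim_ definition above) =====
theorem predict_ball2_spec : Claim_equal_predict_ball2 := by
  intro ball1 ball6 past_data top_k _ _
  unfold Spec_predict_ball2 predict_ball2 predict_ball2_alt
  simp only
  rw [suffix10 past_data, suffix20 past_data,
    PySem.List.slice_from_neg_ofNat past_data 20 (by omega)]
  congr 1
  set L := past_data.drop (past_data.length - 20) with hL
  have h10 : past_data.drop (past_data.length - 10) = L.drop (L.length - 10) := by
    rw [hL, List.drop_drop, List.length_drop]
    congr 1
    omega
  rw [h10]
  -- A's skip-or-append loop is a map over the kept candidates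
  rw [PySem.List.foldl_congr_mem (PySem.List.pyRange 1 46 1) _
    (fun acc num =>
      if !PySem.Set.contains (PySem.Set.ofList [ball1, ball6]) num then
        acc ++ [(num,
          (PySem.Dict.counter ((L.drop (L.length - 10)).map ball2Of)).getD num 0 * 2
            + (PySem.Dict.counter (L.map ball2Of)).getD num 0)]
      else acc) []
    (by
      intro acc x _
      cases h : PySem.Set.contains (PySem.Set.ofList [ball1, ball6]) x
      · simp only [h, Bool.not_false]
        simp
      · simp only [h, Bool.not_true]
        simp)]
  rw [PySem.List.foldl_append_if]
  rw [List.nil_append]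
  congr 1
  apply List.map_congr_left
  intro num _
  rw [← score_eq L num]
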